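-- pv_equiv track=rewrite | github.com/edummoreno/healthcare-mini-mvp | engine.py | _phrase_matches_with_gaps
-- ===== SOURCE A (Python) =====
-- def _phrase_matches_with_gaps(text_norm: str, phrase_norm: str, max_gap: int = 2) -> bool:
--     """
--     Frase por tokens em ordem, permitindo até `max_gap` tokens no meio.
--     Ex: "visao embacada" casa com "minha visao esta bem embacada".
--     """
--     t = text_norm.split()
--     p = phrase_norm.split()
--     if not p:
--         return False
--
--     for start in range(len(t)):
--         if t[start] != p[0]:
--             continue
--
--         ti = start + 1
--         ok = True
--         for pj in p[1:]:
--             gap = 0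
--             while ti < len(t) and gap <= max_gap and t[ti] != pj:
--                 ti += 1
--                 gap += 1
--             if ti >= len(t) or gap > max_gap or t[ti] != pj:
--                 ok = False
--                 break
--             ti += 1
--
--         if ok:
--             return True
--
--     return False
-- ===== SOURCE B (Python) =====
-- def _phrase_matches_with_gaps(text_norm: str, phrase_norm: str, max_gap: int = 2) -> bool:
--     t = text_norm.split()
--     p = phrase_norm.split()
--     if not p:
--         return False
--     # inverted index: for each phrase token, its positions in t, in increasing order
--     occ = [[i for i, w in enumerate(t) if w == x] for x in p]
--     rest = occ[1:]
--     for start in occ[0]: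
--         ti = start + 1
--         for lst in rest:
--             nxt = None
--             for i in lst:
--                 if i >= ti:
--                     nxt = i
--                     break
--             if nxt is None or nxt > ti + max_gap:
--                 break
--             ti = nxt + 1
--         else:
--             return True
--     return False
-- ===== Notes on version B (the rewrite author's own statement) =====
-- stated objective: alternative
-- what changed: B builds an inverted index (for each phrase token, its sorted list of positions in the text) and walks position lists taking the first position >= ti per token, instead of A's re-scan of the token array counting gap tokens for every phrase word at every candidate start.
import Mathlib
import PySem

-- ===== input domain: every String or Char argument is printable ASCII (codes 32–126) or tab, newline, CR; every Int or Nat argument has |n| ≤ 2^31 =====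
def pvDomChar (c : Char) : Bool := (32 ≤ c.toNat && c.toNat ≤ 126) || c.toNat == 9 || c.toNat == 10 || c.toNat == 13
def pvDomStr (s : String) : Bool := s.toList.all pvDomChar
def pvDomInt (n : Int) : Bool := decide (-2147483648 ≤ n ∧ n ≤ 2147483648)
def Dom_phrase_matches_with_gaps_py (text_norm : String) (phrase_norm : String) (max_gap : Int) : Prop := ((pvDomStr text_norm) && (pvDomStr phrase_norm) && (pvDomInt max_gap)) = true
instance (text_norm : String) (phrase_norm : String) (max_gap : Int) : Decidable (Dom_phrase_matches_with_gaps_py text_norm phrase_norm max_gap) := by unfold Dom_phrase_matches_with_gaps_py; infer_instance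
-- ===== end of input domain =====

-- B replaces A's token-array walk (re-scanning the token list and counting gap tokens for each
-- phrase word) by an inverted index of token positions probed for the first position ≥ ti;
-- objective: alternative (same result, different data structure and traversal).

-- ===== PORT A =====
-- the inner `while ti < len(t) and gap <= max_gap and t[ti] != pj` loop
def pvWhileA (t : List String) (pj : String) (g : Int) (ti gap : Nat) : Nat × Nat :=
  if ti < t.length ∧ (gap : Int) ≤ g ∧ t.getD ti "" ≠ pj then
    pvWhileA t pj g (ti + 1) (gap + 1)
  else (ti, gap)
termination_by t.length - ti

-- the `for pj in p[1:]` loop with its ok/break logic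
def pvInnerA (t : List String) (g : Int) : List String → Nat → Bool
  | [], _ => true
  | pj :: rest, ti =>
    let r := pvWhileA t pj g ti 0
    if t.length ≤ r.1 ∨ g < (r.2 : Int) ∨ t.getD r.1 "" ≠ pj then false
    else pvInnerA t g rest (r.1 + 1)

-- the `for start in range(len(t))` loop with early return
def pvOuterA (t p : List String) (g : Int) (start : Nat) : Bool :=
  if start < t.length then
    if t.getD start "" ≠ p.headD "" then pvOuterA t p g (start + 1)
    else if pvInnerA t g p.tail (start + 1) then true
    else pvOuterA t p g (start + 1)
  else false
termination_by t.length - start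

def phrase_matches_with_gaps_py (text_norm : String) (phrase_norm : String) (max_gap : Int) : Bool :=
  let t := PySem.Str.split₀ text_norm
  let p := PySem.Str.split₀ phrase_norm
  if p.isEmpty then false
  else pvOuterA t p max_gap 0

-- ===== PORT B =====
-- [i for i, w in enumerate(t) if w == x]
def pvOccOf (t : List String) (x : String) : List Int :=
  ((PySem.List.enumerate t 0).filter (fun q => q.2 == x)).map (·.1)

-- the `for lst in rest` loop; the probe `for i in lst: if i >= ti: nxt = i; break` is List.find?
def pvInnerB (g : Int) : List (List Int) → Int → Bool
  | [], _ => true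
  | lst :: rest, ti =>
    match lst.find? (fun i => decide (ti ≤ i)) with
    | none => false
    | some nxt => if ti + g < nxt then false else pvInnerB g rest (nxt + 1)

-- the `for start in occ[0]` loop
def pvOuterB (g : Int) (rest : List (List Int)) : List Int → Bool
  | [] => false
  | start :: more =>
    if pvInnerB g rest (start + 1) then true else pvOuterB g rest more

def phrase_matches_with_gaps_py_alt (text_norm : String) (phrase_norm : String) (max_gap : Int) : Bool :=
  let t := PySem.Str.split₀ text_norm
  let p := PySem.Str.split₀ phrase_norm
  if p.isEmpty then false
  else
    let occ := p.map (pvOccOf t)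
    pvOuterB max_gap occ.tail (occ.headD [])

-- ===== PRECONDITION & SPEC =====
def Spec_phrase_matches_with_gaps_py (text_norm : String) (phrase_norm : String) (max_gap : Int) (out : Bool) : Prop := out = phrase_matches_with_gaps_py_alt text_norm phrase_norm max_gap
instance (text_norm : String) (phrase_norm : String) (max_gap : Int) (out : Bool) : Decidable (Spec_phrase_matches_with_gaps_py text_norm phrase_norm max_gap out) := by unfold Spec_phrase_matches_with_gaps_py; infer_instance

-- ===== CLAIM (what is proved, stated in full; the proofs are below) =====
def Claim_equal_phrase_matches_with_gaps_py : Prop := ∀ (text_norm : String) (phrase_norm : String) (max_gap : Int), Dom_phrase_matches_with_gaps_py text_norm phrase_norm max_gap → Spec_phrase_matches_with_gaps_py text_norm phrase_norm max_gap (phrase_matches_with_gaps_py text_norm phrase_norm max_gap)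

-- ===== LEMMAS AND PROOFS =====

-- membership in the inverted index = occurrence of the token
theorem pv_mem_occOf (t : List String) (x : String) (i : Int) :
    i ∈ pvOccOf t x ↔ ∃ k : Nat, k < t.length ∧ i = (k : Int) ∧ t.getD k "" = x := by
  simp only [pvOccOf, List.mem_map, List.mem_filter]
  constructor
  · rintro ⟨⟨a, b⟩, ⟨hmem, hb⟩, rfl⟩
    rw [PySem.List.mem_enumerate_iff] at hmem
    obtain ⟨k, hk, hp⟩ := hmem
    cases hp
    refine ⟨k, hk, by simp, ?_⟩
    simp at hb
    simp [List.getD_eq_getElem?_getD, hk, hb]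
  · rintro ⟨k, hk, rfl, hx⟩
    refine ⟨((k : Int), t[k]), ⟨?_, ?_⟩, rfl⟩
    · rw [PySem.List.mem_enumerate_iff]; exact ⟨k, hk, by simp⟩
    · simp [List.getD_eq_getElem?_getD, hk] at hx ⊢; exact hx

-- the inverted index lists positions in strictly increasing order
theorem pv_occOf_pairwise (t : List String) (x : String) :
    (pvOccOf t x).Pairwise (· < ·) := by
  have h := PySem.List.pairwise_lt_enumerate (xs := t) (s := 0)
  exact List.Pairwise.map _ (by intro a b hab; exact hab) (h.filter _)

-- B's probe returns the least element ≥ x of a strictly sorted list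
theorem pv_find_ge_sorted (x : Int) :
    ∀ (l : List Int), l.Pairwise (· < ·) →
    (match l.find? (fun i => decide (x ≤ i)) with
     | none => ∀ y ∈ l, y < x
     | some m => m ∈ l ∧ x ≤ m ∧ ∀ y ∈ l, x ≤ y → m ≤ y) := by
  intro l
  induction l with
  | nil => intro _; simp [List.find?]
  | cons a l ih =>
    intro hp
    rw [List.pairwise_cons] at hp
    by_cases hx : x ≤ a
    · simp only [List.find?, decide_eq_true hx]
      refine ⟨List.mem_cons_self, hx, ?_⟩
      intro y hy _
      rcases List.mem_cons.1 hy with rfl | hy'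
      · exact le_refl y
      · exact le_of_lt (hp.1 y hy')
    · have : (fun i => decide (x ≤ i)) a = false := by simp [hx]
      simp only [List.find?, this]
      have := ih hp.2
      rcases hfind : l.find? (fun i => decide (x ≤ i)) with _ | m
      · rw [hfind] at this
        simp only []
        intro y hy
        rcases List.mem_cons.1 hy with rfl | hy'
        · omega
        · exact this y hy'
      · rw [hfind] at this
        refine ⟨List.mem_cons_of_mem _ this.1, this.2.1, ?_⟩
        intro y hy hxy
        rcases List.mem_cons.1 hy with rfl | hy'
        · omega
        · exact this.2.2 y hy' hxy

-- A's scan ends exactly at the first occurrence, when it lies within the window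
theorem pv_whileA_succ (t : List String) (pj : String) (g : Int) :
    ∀ (d ti gap pos : Nat), pos - ti = d → ti ≤ pos → pos < t.length → t.getD pos "" = pj →
    (∀ j : Nat, ti ≤ j → j < pos → t.getD j "" ≠ pj) →
    (gap : Int) + ((pos : Int) - (ti : Int)) ≤ g →
    pvWhileA t pj g ti gap = (pos, gap + (pos - ti)) := by
  intro d
  induction d with
  | zero =>
    intro ti gap pos hd hle _ hpos _ _
    have : pos = ti := by omega
    subst this
    rw [pvWhileA]
    rw [if_neg (fun h => h.2.2 hpos)]
    simp
  | succ n ih =>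
    intro ti gap pos hd hle hlt hpos hmin hg
    have hti : ti < pos := by omega
    rw [pvWhileA]
    have h1 : ti < t.length := by omega
    have h2 : (gap : Int) ≤ g := by omega
    have h3 : t.getD ti "" ≠ pj := hmin ti le_rfl hti
    rw [if_pos ⟨h1, h2, h3⟩]
    have := ih (ti+1) (gap+1) pos (by omega) (by omega) hlt hpos
      (fun j hj hj2 => hmin j (by omega) hj2) (by push_cast; omega)
    rw [this]
    congr 1
    omega

-- when every occurrence at or after ti exceeds the window, A's check fails
theorem pv_whileA_fail (t : List String) (pj : String) (g : Int) :
    ∀ (d ti gap : Nat), t.length - ti = d →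
    (∀ j : Nat, ti ≤ j → j < t.length → t.getD j "" = pj → g < (gap : Int) + ((j : Int) - (ti : Int))) →
    (t.length ≤ (pvWhileA t pj g ti gap).1 ∨ g < ((pvWhileA t pj g ti gap).2 : Int) ∨
      t.getD (pvWhileA t pj g ti gap).1 "" ≠ pj) := by
  intro d
  induction d with
  | zero =>
    intro ti gap hd _
    rw [pvWhileA]
    have : ¬ (ti < t.length ∧ (gap : Int) ≤ g ∧ t.getD ti "" ≠ pj) := by
      rintro ⟨h1, _, _⟩; omega
    rw [if_neg this]
    left; simpa using (by omega : t.length ≤ ti)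
  | succ n ih =>
    intro ti gap hd hall
    rw [pvWhileA]
    by_cases hc : ti < t.length ∧ (gap : Int) ≤ g ∧ t.getD ti "" ≠ pj
    · rw [if_pos hc]
      exact ih (ti+1) (gap+1) (by omega)
        (fun j hj hj2 hj3 => by have := hall j (by omega) hj2 hj3; push_cast at *; omega)
    · rw [if_neg hc]
      simp only []
      by_cases h1 : ti < t.length
      · by_cases h2 : (gap : Int) ≤ g
        · right; right
          intro hpj
          have := hall ti le_rfl h1 hpj
          omega
        · right; left; omega
      · left; omega

-- the phrase-tail loops of A and B agree from any position ti
theorem pv_inner_eq (t : List String) (g : Int) :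
    ∀ (ps : List String) (ti : Nat),
      pvInnerA t g ps ti = pvInnerB g (ps.map (pvOccOf t)) (ti : Int) := by
  intro ps
  induction ps with
  | nil => intro ti; rfl
  | cons pj rest ih =>
    intro ti
    simp only [List.map_cons, pvInnerA, pvInnerB]
    have hfind := pv_find_ge_sorted (ti : Int) (pvOccOf t pj) (pv_occOf_pairwise t pj)
    rcases hf : (pvOccOf t pj).find? (fun i => decide ((ti : Int) ≤ i)) with _ | m
    · -- no occurrence ≥ ti : both sides fail
      rw [hf] at hfind
      have hA := pv_whileA_fail t pj g (t.length - ti) ti 0 rfl (by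
        intro j hj hjlen hjocc
        exfalso
        have : (j : Int) ∈ pvOccOf t pj := (pv_mem_occOf t pj _).2 ⟨j, hjlen, rfl, hjocc⟩
        have := hfind _ this
        omega)
      rw [if_pos (by simpa using hA)]
    · rw [hf] at hfind
      obtain ⟨hmem, hge, hmin⟩ := hfind
      obtain ⟨pos, hposlen, rfl, hocc⟩ := (pv_mem_occOf t pj _).1 hmem
      have hle : ti ≤ pos := by exact_mod_cast hge
      have hminN : ∀ j : Nat, ti ≤ j → j < pos → t.getD j "" ≠ pj := by
        intro j hj hjp hjocc
        have : (j : Int) ∈ pvOccOf t pj :=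
          (pv_mem_occOf t pj _).2 ⟨j, by omega, rfl, hjocc⟩
        have := hmin _ this (by exact_mod_cast hj)
        omega
      by_cases hw : (pos : Int) ≤ (ti : Int) + g
      · -- first occurrence within the window: both sides advance past it
        have hA := pv_whileA_succ t pj g (pos - ti) ti 0 pos rfl hle hposlen hocc hminN
          (by push_cast; omega)
        rw [hA]
        dsimp only
        rw [if_neg (by
          push Not
          refine ⟨by omega, by push_cast; omega, by simpa using hocc⟩)]
        rw [if_neg (by omega), ih (pos + 1)]
        norm_cast
      · -- first occurrence beyond the window: both sides fail
        have hA := pv_whileA_fail t pj g (t.length - ti) ti 0 rfl (by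
          intro j hj hjlen hjocc
          have : (j : Int) ∈ pvOccOf t pj := (pv_mem_occOf t pj _).2 ⟨j, hjlen, rfl, hjocc⟩
          have := hmin _ this (by exact_mod_cast hj)
          push_cast
          omega)
        rw [if_pos (by simpa using hA)]
        dsimp only
        rw [if_pos (by omega)]

-- splitting a strictly sorted list at a member
theorem pv_filter_sorted_cons (x : Int) :
    ∀ (l : List Int), l.Pairwise (· < ·) → x ∈ l →
      l.filter (fun i => decide (x ≤ i)) = x :: l.filter (fun i => decide (x + 1 ≤ i)) := by
  intro l
  induction l with
  | nil => intro _ h; cases h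
  | cons a l ih =>
    intro hp hm
    rw [List.pairwise_cons] at hp
    rcases List.mem_cons.1 hm with rfl | hm'
    · have h1 : l.filter (fun i => decide (x ≤ i)) = l := by
        apply List.filter_eq_self.2
        intro b hb; exact decide_eq_true (le_of_lt (hp.1 b hb))
      have h2 : l.filter (fun i => decide (x + 1 ≤ i)) = l := by
        apply List.filter_eq_self.2
        intro b hb; exact decide_eq_true (by have := hp.1 b hb; omega)
      simp only [List.filter_cons, decide_eq_true_eq]
      rw [if_pos (le_refl x), if_neg (by omega), h1, h2]
    · have hax : a < x := hp.1 x hm'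
      have := ih hp.2 hm'
      simp only [List.filter_cons, decide_eq_false (by omega : ¬ x ≤ a),
        decide_eq_false (by omega : ¬ x + 1 ≤ a)]
      simpa using this

-- A's start scan from s = B's walk over the index entries ≥ s
theorem pv_outer_eq (t p : List String) (g : Int) :
    ∀ (d s : Nat), t.length - s = d →
      pvOuterA t p g s = pvOuterB g (p.tail.map (pvOccOf t))
        ((pvOccOf t (p.headD "")).filter (fun i => decide ((s : Int) ≤ i))) := by
  intro d
  induction d with
  | zero =>
    intro s hd
    rw [pvOuterA, if_neg (by omega)]
    have : (pvOccOf t (p.headD "")).filter (fun i => decide ((s : Int) ≤ i)) = [] := by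
      apply List.filter_eq_nil_iff.2
      intro i hi
      obtain ⟨k, hk, rfl, _⟩ := (pv_mem_occOf t _ i).1 hi
      simp; omega
    rw [this]
    rfl
  | succ n ih =>
    intro s hd
    rw [pvOuterA, if_pos (by omega : s < t.length)]
    by_cases hh : t.getD s "" = p.headD ""
    · rw [if_neg (by simpa [List.getD_eq_getElem?_getD, List.headD_eq_head?_getD] using hh)]
      have hmem : (s : Int) ∈ pvOccOf t (p.headD "") :=
        (pv_mem_occOf t _ _).2 ⟨s, by omega, rfl, hh⟩
      rw [pv_filter_sorted_cons _ _ (pv_occOf_pairwise t _) hmem]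
      show _ = pvOuterB g _ (_ :: _)
      rw [pvOuterB]
      rw [pv_inner_eq t g p.tail (s + 1)]
      have hc : ((s : Int) + 1) = ((s + 1 : Nat) : Int) := by push_cast; ring
      rw [hc, ih (s + 1) (by omega)]
    · rw [if_pos (by simpa [List.getD_eq_getElem?_getD, List.headD_eq_head?_getD] using hh)]
      have hfc : (pvOccOf t (p.headD "")).filter (fun i => decide ((s : Int) ≤ i)) =
          (pvOccOf t (p.headD "")).filter (fun i => decide (((s + 1 : Nat) : Int) ≤ i)) := by
        apply List.filter_congr
        intro i hi
        obtain ⟨k, hk, rfl, hkocc⟩ := (pv_mem_occOf t _ i).1 hi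
        have : k ≠ s := fun h => hh (h ▸ hkocc)
        simp only [decide_eq_decide]
        push_cast
        omega
      rw [hfc, ih (s + 1) (by omega)]

-- ===== VERDICT (by name: the statement is the Claim_ definition above) =====
theorem phrase_matches_with_gaps_py_spec : Claim_equal_phrase_matches_with_gaps_py := by
  intro text phrase g _
  unfold Spec_phrase_matches_with_gaps_py phrase_matches_with_gaps_py phrase_matches_with_gaps_py_alt
  set t := PySem.Str.split₀ text with ht
  cases hp : PySem.Str.split₀ phrase with
  | nil => simp
  | cons p0 ptail =>
    simp only [List.isEmpty_cons, Bool.false_eq_true, if_false, List.map_cons,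
      List.tail_cons, List.headD_cons]
    have h0 : (pvOccOf t p0).filter (fun i => decide (((0 : Nat) : Int) ≤ i)) = pvOccOf t p0 := by
      apply List.filter_eq_self.2
      intro b hb
      obtain ⟨k, _, rfl, _⟩ := (pv_mem_occOf t _ b).1 hb
      simp
    have := pv_outer_eq t (p0 :: ptail) g (t.length - 0) 0 rfl
    simp only [List.tail_cons, List.headD_cons] at this
    rw [this, h0]
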